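-- pv_equiv track=rewrite | github.com/brunoasm/Oenocarpus_genome_phylo | analyses/NCBI_comparisons/03_enrich_curculionidae_taxonomy_wikidata.py | extract_taxonomy_from_lineage
-- ===== SOURCE A (Python) =====
-- def extract_taxonomy_from_lineage(lineage):
--     """
--     Extract relevant taxonomic ranks from lineage.
--
--     Args:
--         lineage: List of taxonomic levels
--
--     Returns:
--         Dict with family, subfamily, and genus
--     """
--     taxonomy = {
--         "family": "",
--         "subfamily": "",
--         "genus": "",
--     }
--
--     for taxon in lineage:
--         rank = taxon["rank"].lower()
--         name = taxon["name"]
--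
--         if rank == "family":
--             taxonomy["family"] = name
--         elif rank == "subfamily":
--             taxonomy["subfamily"] = name
--         elif rank == "genus":
--             taxonomy["genus"] = name
--
--     return taxonomy
-- ===== SOURCE B (Python) =====
-- def extract_taxonomy_from_lineage(lineage):
--     """
--     Extract relevant taxonomic ranks from lineage.
--
--     Instead of one forward pass with branch accumulation, search the lineage
--     BACKWARDS once per wanted rank and take the first match (= last occurrence),
--     defaulting to ''.
--     """
--     def last_name(rank):
--         for taxon in reversed(lineage):
--             if taxon["rank"].lower() == rank:
--                 return taxon["name"]
--         return ""
--     return {rank: last_name(rank) for rank in ("family", "subfamily", "genus")}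
-- ===== Notes on version B (the rewrite author's own statement) =====
-- stated objective: alternative
-- what changed: Replaces A's single forward pass with a branching accumulator by three independent backward searches with early return (first match in reversed(lineage) per rank, default ''), preserving last-occurrence-wins.
import Mathlib
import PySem

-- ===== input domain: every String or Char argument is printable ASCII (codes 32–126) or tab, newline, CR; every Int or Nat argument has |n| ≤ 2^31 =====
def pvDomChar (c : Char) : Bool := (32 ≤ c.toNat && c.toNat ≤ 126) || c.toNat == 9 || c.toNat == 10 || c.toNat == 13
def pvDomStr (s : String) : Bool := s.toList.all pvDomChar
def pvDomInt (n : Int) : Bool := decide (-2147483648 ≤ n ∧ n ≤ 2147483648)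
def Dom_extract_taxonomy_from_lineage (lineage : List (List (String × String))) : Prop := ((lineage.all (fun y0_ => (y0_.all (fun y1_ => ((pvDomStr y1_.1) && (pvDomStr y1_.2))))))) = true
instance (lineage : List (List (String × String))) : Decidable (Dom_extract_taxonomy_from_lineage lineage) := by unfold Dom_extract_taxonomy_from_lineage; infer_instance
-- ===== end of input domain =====

-- B replaces A's forward pass with a branching accumulator by three independent backward
-- searches with early return (first match from the end per rank); same O(n) cost.

-- ===== PORT A =====
-- taxon["rank"] / taxon["name"]: KeyError (excluded by Pre_) ported as getD with "" default.
def extract_taxonomy_from_lineage (lineage : List (List (String × String))) : List (String × String) :=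
  let taxonomy : PySem.Dict String String :=
    PySem.Dict.ofList [("family", ""), ("subfamily", ""), ("genus", "")]
  let taxonomy := lineage.foldl (fun taxonomy taxon =>
    let rank := PySem.Str.lower ((PySem.Dict.ofList taxon).getD "rank" "")
    let name := (PySem.Dict.ofList taxon).getD "name" ""
    if rank == "family" then taxonomy.insert "family" name
    else if rank == "subfamily" then taxonomy.insert "subfamily" name
    else if rank == "genus" then taxonomy.insert "genus" name
    else taxonomy) taxonomy
  taxonomy.items

-- ===== PORT B =====
-- Source B's last_name: scan the (already reversed) list, return at the first rank match, else "".
def pvLastName (L : List (List (String × String))) (rank : String) : String :=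
  match L with
  | [] => ""
  | taxon :: rest =>
      if PySem.Str.lower ((PySem.Dict.ofList taxon).getD "rank" "") == rank
      then (PySem.Dict.ofList taxon).getD "name" ""
      else pvLastName rest rank

def extract_taxonomy_from_lineage_alt (lineage : List (List (String × String))) : List (String × String) :=
  [("family", pvLastName lineage.reverse "family"),
   ("subfamily", pvLastName lineage.reverse "subfamily"),
   ("genus", pvLastName lineage.reverse "genus")]

-- ===== PRECONDITION & SPEC =====
-- Pre_ excludes exactly the taxa missing a "rank" or "name" key, on which Python A raises KeyError.
def Pre_extract_taxonomy_from_lineage (lineage : List (List (String × String))) : Prop :=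
  (lineage.all (fun t => t.any (fun p => p.1 == "rank") && t.any (fun p => p.1 == "name"))) = true
instance (lineage : List (List (String × String))) : Decidable (Pre_extract_taxonomy_from_lineage lineage) := by unfold Pre_extract_taxonomy_from_lineage; infer_instance
def pvWitness_extract_taxonomy_from_lineage : (List (List (String × String))) :=
  [[("rank", "Family"), ("name", "Curculionidae")], [("rank", "genus"), ("name", "Sitophilus")]]

def Spec_extract_taxonomy_from_lineage (lineage : List (List (String × String))) (out : List (String × String)) : Prop := out = extract_taxonomy_from_lineage_alt lineage
instance (lineage : List (List (String × String))) (out : List (String × String)) : Decidable (Spec_extract_taxonomy_from_lineage lineage out) := by unfold Spec_extract_taxonomy_from_lineage; infer_instance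

-- ===== CLAIM (what is proved, stated in full; the proofs are below) =====
def Claim_equal_extract_taxonomy_from_lineage : Prop := ∀ (lineage : List (List (String × String))), Dom_extract_taxonomy_from_lineage lineage → Pre_extract_taxonomy_from_lineage lineage → Spec_extract_taxonomy_from_lineage lineage (extract_taxonomy_from_lineage lineage)

-- ===== LEMMAS AND PROOFS =====

-- proof-side generalisation of pvLastName with an explicit default
def pvFindF (L : List (List (String × String))) (k v : String) : String :=
  match L with
  | [] => v
  | taxon :: rest =>
      if PySem.Str.lower ((PySem.Dict.ofList taxon).getD "rank" "") == k
      then (PySem.Dict.ofList taxon).getD "name" ""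
      else pvFindF rest k v

-- the last name whose rank matches k, starting from v (tail-recursive, matching A's fold)
def pvUpd (L : List (List (String × String))) (k : String) (v : String) : String :=
  match L with
  | [] => v
  | t :: rest =>
      pvUpd rest k
        (if PySem.Str.lower ((PySem.Dict.ofList t).getD "rank" "") == k
         then (PySem.Dict.ofList t).getD "name" "" else v)

theorem pvLastName_eq_findF (L : List (List (String × String))) (k : String) :
    pvLastName L k = pvFindF L k "" := by
  induction L with
  | nil => rfl
  | cons t rest ih => simp [pvLastName, pvFindF, ih]

theorem pvFindF_append (xs ys : List (List (String × String))) (k v : String) :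
    pvFindF (xs ++ ys) k v = pvFindF xs k (pvFindF ys k v) := by
  induction xs with
  | nil => rfl
  | cons t rest ih => simp [pvFindF, ih]

theorem pvUpd_eq_findF_reverse (L : List (List (String × String))) (k v : String) :
    pvUpd L k v = pvFindF L.reverse k v := by
  induction L generalizing v with
  | nil => rfl
  | cons t rest ih =>
      simp only [pvUpd, List.reverse_cons, pvFindF_append, ih]
      rfl

theorem pvA_fold (L : List (List (String × String))) (f s g : String) :
    (L.foldl (fun taxonomy taxon =>
      let rank := PySem.Str.lower ((PySem.Dict.ofList taxon).getD "rank" "")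
      let name := (PySem.Dict.ofList taxon).getD "name" ""
      if rank == "family" then taxonomy.insert "family" name
      else if rank == "subfamily" then taxonomy.insert "subfamily" name
      else if rank == "genus" then taxonomy.insert "genus" name
      else taxonomy)
      (PySem.Dict.mk [("family", f), ("subfamily", s), ("genus", g)])).items
    = [("family", pvUpd L "family" f), ("subfamily", pvUpd L "subfamily" s),
       ("genus", pvUpd L "genus" g)] := by
  induction L generalizing f s g with
  | nil => simp [pvUpd]
  | cons t rest ih =>
      simp only [List.foldl_cons, pvUpd]
      set r := PySem.Str.lower ((PySem.Dict.ofList t).getD "rank" "") with hr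
      set n := (PySem.Dict.ofList t).getD "name" "" with hn
      by_cases h1 : r = "family"
      · have hins : (PySem.Dict.mk [("family", f), ("subfamily", s), ("genus", g)]).insert "family" n
            = PySem.Dict.mk [("family", n), ("subfamily", s), ("genus", g)] := by
          apply PySem.Dict.ext
          simp [PySem.Dict.items_insert, PySem.Dict.contains_mk]
        simpa [h1, hins] using ih n s g
      · by_cases h2 : r = "subfamily"
        · have hins : (PySem.Dict.mk [("family", f), ("subfamily", s), ("genus", g)]).insert "subfamily" n
              = PySem.Dict.mk [("family", f), ("subfamily", n), ("genus", g)] := by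
            apply PySem.Dict.ext
            simp [PySem.Dict.items_insert, PySem.Dict.contains_mk]
          simpa [h1, h2, hins] using ih f n g
        · by_cases h3 : r = "genus"
          · have hins : (PySem.Dict.mk [("family", f), ("subfamily", s), ("genus", g)]).insert "genus" n
                = PySem.Dict.mk [("family", f), ("subfamily", s), ("genus", n)] := by
              apply PySem.Dict.ext
              simp [PySem.Dict.items_insert, PySem.Dict.contains_mk]
            simpa [h1, h2, h3, hins] using ih f s n
          · simpa [h1, h2, h3] using ih f s g

-- ===== VERDICT (by name: the statement is the Claim_ definition above) =====
theorem extract_taxonomy_from_lineage_spec : Claim_equal_extract_taxonomy_from_lineage := by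
  intro lineage _ _
  show extract_taxonomy_from_lineage lineage = extract_taxonomy_from_lineage_alt lineage
  unfold extract_taxonomy_from_lineage extract_taxonomy_from_lineage_alt
  simp only [pvLastName_eq_findF, ← pvUpd_eq_findF_reverse]
  exact pvA_fold lineage "" "" ""
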